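-- pv_equiv track=rewrite | github.com/kitchenartsandletters/NYT_weekly_and_preorder_release | weekly_sales_report.py | validate_sales_data
-- ===== SOURCE A (Python) =====
-- def validate_sales_data(sales_data, skipped_items):
--     """
--     Performs basic validation checks on sales data
--     Returns a list of warnings if any issues are found
--     """
--     warnings = []
--
--     # Basic volume checks
--     total_quantity = sum(sales_data.values())
--     if total_quantity == 0:
--         warnings.append("WARNING: No sales recorded for this period")
--
--     # ISBN format check
--     invalid_isbns = [isbn for isbn in sales_data.keys()
--                     if not (str(isbn).startswith('978') or str(isbn).startswith('979'))]
--     if invalid_isbns: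
--         warnings.append(f"WARNING: Found {len(invalid_isbns)} invalid ISBNs in sales data")
--
--     # Unusual quantities check (more than 1000 of any single ISBN)
--     large_quantities = [(isbn, qty) for isbn, qty in sales_data.items() if qty > 1000]
--     if large_quantities:
--         warnings.append(f"WARNING: Unusually large quantities found for {len(large_quantities)} ISBNs")
--         for isbn, qty in large_quantities:
--             warnings.append(f"         ISBN: {isbn}, Quantity: {qty}")
--
--     # Check for negative quantities
--     negative_quantities = [(isbn, qty) for isbn, qty in sales_data.items() if qty < 0]
--     if negative_quantities:
--         warnings.append(f"WARNING: Found {len(negative_quantities)} ISBNs with negative quantities")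
--
--     # Basic skipped items analysis
--     if len(skipped_items) > 100:  # Arbitrary threshold
--         warnings.append(f"WARNING: Large number of skipped items: {len(skipped_items)}")
--
--     return warnings
-- ===== SOURCE B (Python) =====
-- def validate_sales_data(sales_data, skipped_items):
--     """Single-pass validation: one loop accumulates all four statistics,
--     then the warning list is assembled by concatenating the five blocks."""
--     total = 0
--     invalid = 0
--     large = []
--     negative = 0
--     for isbn, qty in sales_data.items():
--         total += qty
--         if not (str(isbn).startswith('978') or str(isbn).startswith('979')):
--             invalid += 1
--         if qty > 1000:
--             large.append((isbn, qty))
--         if qty < 0: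
--             negative += 1
--     return (
--         (["WARNING: No sales recorded for this period"] if total == 0 else [])
--         + ([f"WARNING: Found {invalid} invalid ISBNs in sales data"] if invalid else [])
--         + ([f"WARNING: Unusually large quantities found for {len(large)} ISBNs"]
--            + [f"         ISBN: {isbn}, Quantity: {qty}" for isbn, qty in large]
--            if large else [])
--         + ([f"WARNING: Found {negative} ISBNs with negative quantities"] if negative else [])
--         + ([f"WARNING: Large number of skipped items: {len(skipped_items)}"]
--            if len(skipped_items) > 100 else [])
--     )
-- ===== Notes on version B (the rewrite author's own statement) =====
-- stated objective: alternative
-- what changed: Replaces A's four separate passes (sum plus three list comprehensions over the dict) with a single loop that accumulates the total, the invalid-ISBN count, the large-quantity list and the negative count together, then assembles the warning list by concatenating the five blocks instead of conditional appends.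
import Mathlib
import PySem

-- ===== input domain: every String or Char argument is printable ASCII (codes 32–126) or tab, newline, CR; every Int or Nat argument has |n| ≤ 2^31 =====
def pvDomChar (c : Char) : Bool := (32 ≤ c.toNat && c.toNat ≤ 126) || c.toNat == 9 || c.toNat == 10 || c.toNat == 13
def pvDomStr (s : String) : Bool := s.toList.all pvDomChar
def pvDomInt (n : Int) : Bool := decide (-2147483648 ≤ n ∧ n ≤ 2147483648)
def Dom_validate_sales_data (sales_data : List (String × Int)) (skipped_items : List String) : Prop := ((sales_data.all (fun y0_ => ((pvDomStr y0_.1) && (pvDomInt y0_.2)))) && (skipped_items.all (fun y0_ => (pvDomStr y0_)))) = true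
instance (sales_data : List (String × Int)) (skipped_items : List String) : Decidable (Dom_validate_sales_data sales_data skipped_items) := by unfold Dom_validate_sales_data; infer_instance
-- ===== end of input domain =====

-- B replaces A's four separate passes with one accumulating loop and block concatenation; same O(n) cost, alternative decomposition.


-- ===== PORT A =====
def pvInvalidIsbn (isbn : String) : Bool :=
  !(PySem.Str.startswith isbn "978" || PySem.Str.startswith isbn "979")

def validate_sales_data (sales_data : List (String × Int)) (skipped_items : List String) : List String :=
  let warnings : List String := []
  let total_quantity : Int := (sales_data.map Prod.snd).sum
  let warnings := if total_quantity = 0 then warnings ++ ["WARNING: No sales recorded for this period"] else warnings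
  let invalid_isbns := (sales_data.map Prod.fst).filter pvInvalidIsbn
  let warnings := if invalid_isbns ≠ [] then
      warnings ++ ["WARNING: Found " ++ PySem.Int.toStr (invalid_isbns.length : Int) ++ " invalid ISBNs in sales data"]
    else warnings
  let large_quantities := sales_data.filter (fun p => p.2 > 1000)
  let warnings := if large_quantities ≠ [] then
      large_quantities.foldl
        (fun w p => w ++ ["         ISBN: " ++ p.1 ++ ", Quantity: " ++ PySem.Int.toStr p.2])
        (warnings ++ ["WARNING: Unusually large quantities found for " ++ PySem.Int.toStr (large_quantities.length : Int) ++ " ISBNs"])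
    else warnings
  let negative_quantities := sales_data.filter (fun p => p.2 < 0)
  let warnings := if negative_quantities ≠ [] then
      warnings ++ ["WARNING: Found " ++ PySem.Int.toStr (negative_quantities.length : Int) ++ " ISBNs with negative quantities"]
    else warnings
  let warnings := if (skipped_items.length : Int) > 100 then
      warnings ++ ["WARNING: Large number of skipped items: " ++ PySem.Int.toStr (skipped_items.length : Int)]
    else warnings
  warnings

-- ===== PORT B =====
-- one accumulating step of B's single loop
def pvAltStep (st : Int × Int × List (String × Int) × Int) (p : String × Int) :
    Int × Int × List (String × Int) × Int :=
  (st.1 + p.2,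
   if pvInvalidIsbn p.1 then st.2.1 + 1 else st.2.1,
   if p.2 > 1000 then st.2.2.1 ++ [p] else st.2.2.1,
   if p.2 < 0 then st.2.2.2 + 1 else st.2.2.2)

def validate_sales_data_alt (sales_data : List (String × Int)) (skipped_items : List String) : List String :=
  let st := sales_data.foldl pvAltStep (0, 0, [], 0)
  let total := st.1
  let invalid := st.2.1
  let large := st.2.2.1
  let negative := st.2.2.2
  (if total = 0 then ["WARNING: No sales recorded for this period"] else [])
  ++ (if invalid ≠ 0 then ["WARNING: Found " ++ PySem.Int.toStr invalid ++ " invalid ISBNs in sales data"] else [])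
  ++ (if large ≠ [] then
        ("WARNING: Unusually large quantities found for " ++ PySem.Int.toStr (large.length : Int) ++ " ISBNs")
        :: large.map (fun p => "         ISBN: " ++ p.1 ++ ", Quantity: " ++ PySem.Int.toStr p.2)
      else [])
  ++ (if negative ≠ 0 then ["WARNING: Found " ++ PySem.Int.toStr negative ++ " ISBNs with negative quantities"] else [])
  ++ (if (skipped_items.length : Int) > 100 then
        ["WARNING: Large number of skipped items: " ++ PySem.Int.toStr (skipped_items.length : Int)]
      else [])

-- ===== PRECONDITION & SPEC =====
def Spec_validate_sales_data (sales_data : List (String × Int)) (skipped_items : List String) (out : List String) : Prop := out = validate_sales_data_alt sales_data skipped_items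
instance (sales_data : List (String × Int)) (skipped_items : List String) (out : List String) : Decidable (Spec_validate_sales_data sales_data skipped_items out) := by unfold Spec_validate_sales_data; infer_instance

-- ===== CLAIM (what is proved, stated in full; the proofs are below) =====
def Claim_equal_validate_sales_data : Prop := ∀ (sales_data : List (String × Int)) (skipped_items : List String), Dom_validate_sales_data sales_data skipped_items → Spec_validate_sales_data sales_data skipped_items (validate_sales_data sales_data skipped_items)

-- ===== LEMMAS AND PROOFS =====

-- B's loop computes exactly the four aggregates A computes in separate passes.
theorem pvAltStep_foldl (l : List (String × Int)) (t inv neg : Int) (lg : List (String × Int)) :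
    l.foldl pvAltStep (t, inv, lg, neg) =
      (t + (l.map Prod.snd).sum,
       inv + ((l.countP fun p => pvInvalidIsbn p.1 : Nat) : Int),
       lg ++ l.filter (fun p => decide (p.2 > 1000)),
       neg + ((l.countP fun p => decide (p.2 < 0) : Nat) : Int)) := by
  induction l generalizing t inv lg neg with
  | nil => simp
  | cons h tl ih =>
    simp only [List.foldl_cons, pvAltStep, ih, List.map_cons, List.sum_cons,
      List.countP_cons, List.filter_cons]
    by_cases h1 : pvInvalidIsbn h.1 <;> by_cases h2 : h.2 > 1000 <;> by_cases h3 : h.2 < 0 <;>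
      simp [h1, h2, h3, Prod.ext_iff, List.append_assoc] <;> omega

theorem foldl_append_singleton {α β : Type} (l : List α) (f : α → β) (acc : List β) :
    l.foldl (fun w p => w ++ [f p]) acc = acc ++ l.map f := by
  induction l generalizing acc with
  | nil => simp
  | cons h tl ih => simp [ih]

-- ===== VERDICT (by name: the statement is the Claim_ definition above) =====
theorem validate_sales_data_spec : Claim_equal_validate_sales_data := by
  intro sales_data skipped_items _
  show _ = _
  unfold validate_sales_data validate_sales_data_alt
  simp only [pvAltStep_foldl, Int.zero_add, List.nil_append, foldl_append_singleton]
  have hinv : ((sales_data.map Prod.fst).filter pvInvalidIsbn).length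
      = sales_data.countP (fun p => pvInvalidIsbn p.1) := by
    rw [← List.countP_eq_length_filter, List.countP_map]; rfl
  have hneg : ((sales_data.filter (fun p => decide (p.2 < 0))).length : Int)
      = ((sales_data.countP fun p => decide (p.2 < 0) : Nat) : Int) := by
    rw [← List.countP_eq_length_filter]
  have hinv2 : ((sales_data.map Prod.fst).filter pvInvalidIsbn ≠ ([] : List String))
      ↔ (((sales_data.countP fun p => pvInvalidIsbn p.1 : Nat) : Int) ≠ 0) := by
    rw [← List.length_pos_iff_ne_nil, hinv]; omega
  have hneg2 : (sales_data.filter (fun p => decide (p.2 < 0)) ≠ [])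
      ↔ (((sales_data.countP fun p => decide (p.2 < 0) : Nat) : Int) ≠ 0) := by
    rw [← List.length_pos_iff_ne_nil, ← List.countP_eq_length_filter]; omega
  rw [hinv, hneg]
  simp only [hinv2, hneg2]
  split_ifs <;> simp [List.append_assoc]
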